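-- pv_equiv track=rewrite | github.com/doronrpa-hub/rpa-port-platform | functions/lib/librarian_tags.py | suggest_related_tags
-- ===== SOURCE A (Python) =====
-- def suggest_related_tags(current_tags):
--     """Suggest additional tags that commonly appear with current tags."""
--     suggestions = set()
--     tag_associations = {
--         "tariff": ["classification", "source_israeli"],
--         "classification": ["tariff"],
--         "classification_decision": ["classification", "legal", "customs_authority"],
--         "regulation": ["certificate"],
--         "fta": ["customs_authority", "certificate", "international", "rules_of_origin"],
--         "rules_of_origin": ["fta", "eur1", "authorized_exporter"],
--         "customs_export": ["export_declaration", "classification_export"],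
--         "returned_export": ["customs_export", "conditional_exemption"],
--         "temporary_export": ["customs_export", "ata_carnet"],
--         "ata_carnet": ["temporary_export", "temporary_import", "chamber_of_commerce", "ata_samples"],
--         "declarants": ["declarants_procedure", "customs_authority"],
--         "customs_release": ["customs_inspection", "customs_valuation"],
--         "conditional_exemption": ["drawback", "customs_release"],
--         "bonded_warehouse": ["customs_release", "cargo_tracking"],
--         "personal_import": ["customs_release", "customs_valuation"],
--         "customs_agent": ["customs_agent_license", "customs_broker"],
--         "free_import_order": ["order", "source_israeli", "regulation"],
--         "free_export": ["export_procedure", "source_israeli"],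
--         "export_control": ["ministry_defense", "export_control_dual_use"],
--         "ministry_health": ["procedure_health", "free_import_appendix_4", "free_import_appendix_14"],
--         "ministry_economy": ["procedure_economy", "free_import_appendix_1"],
--         "ministry_agriculture": ["procedure_agriculture", "free_import_appendix_6", "free_import_appendix_17"],
--         "ministry_communications": ["procedure_communications", "free_import_appendix_7"],
--         "ministry_transport": ["procedure_transport", "free_import_appendix_8"],
--         "ministry_defense": ["free_import_appendix_9", "free_import_appendix_12", "export_control"],
--         "ministry_environment": ["free_import_appendix_13", "free_import_appendix_15"],
--         "standards_institute": ["free_import_appendix_2", "certificate"],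
--     }
--
--     for tag in current_tags:
--         if tag in tag_associations:
--             for s in tag_associations[tag]:
--                 if s not in current_tags:
--                     suggestions.add(s)
--
--     return sorted(list(suggestions))
-- ===== SOURCE B (Python) =====
-- def suggest_related_tags(current_tags):
--     """Suggest additional tags that commonly appear with current tags."""
--     current = set(current_tags)
--     return [tag for tag, sources in _RELATED_BY.items()
--             if tag not in current and any(src in current for src in sources)]
--
--
-- # Inverted index of the tag-association table, precomputed once: for each suggestible
-- # tag (in sorted order) the list of current tags that would suggest it.
-- _RELATED_BY = {
--     'ata_carnet': ['temporary_export'],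
--     'ata_samples': ['ata_carnet'],
--     'authorized_exporter': ['rules_of_origin'],
--     'cargo_tracking': ['bonded_warehouse'],
--     'certificate': ['regulation', 'fta', 'standards_institute'],
--     'chamber_of_commerce': ['ata_carnet'],
--     'classification': ['tariff', 'classification_decision'],
--     'classification_export': ['customs_export'],
--     'conditional_exemption': ['returned_export'],
--     'customs_agent_license': ['customs_agent'],
--     'customs_authority': ['classification_decision', 'fta', 'declarants'],
--     'customs_broker': ['customs_agent'],
--     'customs_export': ['returned_export', 'temporary_export'],
--     'customs_inspection': ['customs_release'],
--     'customs_release': ['conditional_exemption', 'bonded_warehouse', 'personal_import'],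
--     'customs_valuation': ['customs_release', 'personal_import'],
--     'declarants_procedure': ['declarants'],
--     'drawback': ['conditional_exemption'],
--     'eur1': ['rules_of_origin'],
--     'export_control': ['ministry_defense'],
--     'export_control_dual_use': ['export_control'],
--     'export_declaration': ['customs_export'],
--     'export_procedure': ['free_export'],
--     'free_import_appendix_1': ['ministry_economy'],
--     'free_import_appendix_12': ['ministry_defense'],
--     'free_import_appendix_13': ['ministry_environment'],
--     'free_import_appendix_14': ['ministry_health'],
--     'free_import_appendix_15': ['ministry_environment'],
--     'free_import_appendix_17': ['ministry_agriculture'],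
--     'free_import_appendix_2': ['standards_institute'],
--     'free_import_appendix_4': ['ministry_health'],
--     'free_import_appendix_6': ['ministry_agriculture'],
--     'free_import_appendix_7': ['ministry_communications'],
--     'free_import_appendix_8': ['ministry_transport'],
--     'free_import_appendix_9': ['ministry_defense'],
--     'fta': ['rules_of_origin'],
--     'international': ['fta'],
--     'legal': ['classification_decision'],
--     'ministry_defense': ['export_control'],
--     'order': ['free_import_order'],
--     'procedure_agriculture': ['ministry_agriculture'],
--     'procedure_communications': ['ministry_communications'],
--     'procedure_economy': ['ministry_economy'],
--     'procedure_health': ['ministry_health'],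
--     'procedure_transport': ['ministry_transport'],
--     'regulation': ['free_import_order'],
--     'rules_of_origin': ['fta'],
--     'source_israeli': ['tariff', 'free_import_order', 'free_export'],
--     'tariff': ['classification'],
--     'temporary_export': ['ata_carnet'],
--     'temporary_import': ['ata_carnet'],
-- }
-- ===== Notes on version B (the rewrite author's own statement) =====
-- stated objective: alternative
-- what changed: B inverts the association table at build time into a precomputed suggestion->sources index whose keys are already in sorted order, and answers a query by one scan over that fixed index (keep a suggestion iff it is not an input tag and one of its sources is), so no suggestion set is accumulated and no sort is performed at query time.
import Mathlib
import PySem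

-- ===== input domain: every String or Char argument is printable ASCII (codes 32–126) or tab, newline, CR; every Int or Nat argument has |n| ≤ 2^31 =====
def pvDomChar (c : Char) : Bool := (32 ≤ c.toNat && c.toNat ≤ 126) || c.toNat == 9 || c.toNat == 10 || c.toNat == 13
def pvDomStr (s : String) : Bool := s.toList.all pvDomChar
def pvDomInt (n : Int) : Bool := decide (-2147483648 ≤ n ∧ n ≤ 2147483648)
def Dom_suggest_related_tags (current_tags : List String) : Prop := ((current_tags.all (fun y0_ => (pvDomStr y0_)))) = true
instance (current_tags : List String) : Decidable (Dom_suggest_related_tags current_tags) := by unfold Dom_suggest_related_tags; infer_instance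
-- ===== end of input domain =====

-- B replaces A's per-input-tag collection loop by a precomputed inverted index: it scans the
-- fixed, already-sorted table of suggestible tags once and keeps those with a source among the
-- input tags — no suggestion set is built and no sort is performed at runtime (objective: alternative).


-- ===== PORT A =====
-- A's literal tag_associations dict
def pvTagAssoc : PySem.Dict String (List String) := PySem.Dict.ofList [
  ("tariff", ["classification", "source_israeli"]),
  ("classification", ["tariff"]),
  ("classification_decision", ["classification", "legal", "customs_authority"]),
  ("regulation", ["certificate"]),
  ("fta", ["customs_authority", "certificate", "international", "rules_of_origin"]),
  ("rules_of_origin", ["fta", "eur1", "authorized_exporter"]),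
  ("customs_export", ["export_declaration", "classification_export"]),
  ("returned_export", ["customs_export", "conditional_exemption"]),
  ("temporary_export", ["customs_export", "ata_carnet"]),
  ("ata_carnet", ["temporary_export", "temporary_import", "chamber_of_commerce", "ata_samples"]),
  ("declarants", ["declarants_procedure", "customs_authority"]),
  ("customs_release", ["customs_inspection", "customs_valuation"]),
  ("conditional_exemption", ["drawback", "customs_release"]),
  ("bonded_warehouse", ["customs_release", "cargo_tracking"]),
  ("personal_import", ["customs_release", "customs_valuation"]),
  ("customs_agent", ["customs_agent_license", "customs_broker"]),
  ("free_import_order", ["order", "source_israeli", "regulation"]),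
  ("free_export", ["export_procedure", "source_israeli"]),
  ("export_control", ["ministry_defense", "export_control_dual_use"]),
  ("ministry_health", ["procedure_health", "free_import_appendix_4", "free_import_appendix_14"]),
  ("ministry_economy", ["procedure_economy", "free_import_appendix_1"]),
  ("ministry_agriculture", ["procedure_agriculture", "free_import_appendix_6", "free_import_appendix_17"]),
  ("ministry_communications", ["procedure_communications", "free_import_appendix_7"]),
  ("ministry_transport", ["procedure_transport", "free_import_appendix_8"]),
  ("ministry_defense", ["free_import_appendix_9", "free_import_appendix_12", "export_control"]),
  ("ministry_environment", ["free_import_appendix_13", "free_import_appendix_15"]),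
  ("standards_institute", ["free_import_appendix_2", "certificate"])]

-- A: for each tag of the input list, if it is a key of the table, add each associated tag not
-- already in current_tags to the `suggestions` set; return sorted(list(suggestions)).
def suggest_related_tags (current_tags : List String) : List String :=
  let suggestions : PySem.Set String :=
    current_tags.foldl (fun sugg tag =>
      if pvTagAssoc.contains tag then
        (pvTagAssoc.getD tag []).foldl (fun sg s =>
          if current_tags.contains s then sg else PySem.Set.add sg s) sugg
      else sugg) PySem.Set.empty
  PySem.List.sorted suggestions (fun x => x) false

-- ===== PORT B =====
-- Source B's literal _RELATED_BY dict: for each suggestible tag (keys in sorted order) the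
-- current tags that would suggest it
def pvRelatedBy : PySem.Dict String (List String) := PySem.Dict.ofList [
  ("ata_carnet", ["temporary_export"]),
  ("ata_samples", ["ata_carnet"]),
  ("authorized_exporter", ["rules_of_origin"]),
  ("cargo_tracking", ["bonded_warehouse"]),
  ("certificate", ["regulation", "fta", "standards_institute"]),
  ("chamber_of_commerce", ["ata_carnet"]),
  ("classification", ["tariff", "classification_decision"]),
  ("classification_export", ["customs_export"]),
  ("conditional_exemption", ["returned_export"]),
  ("customs_agent_license", ["customs_agent"]),
  ("customs_authority", ["classification_decision", "fta", "declarants"]),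
  ("customs_broker", ["customs_agent"]),
  ("customs_export", ["returned_export", "temporary_export"]),
  ("customs_inspection", ["customs_release"]),
  ("customs_release", ["conditional_exemption", "bonded_warehouse", "personal_import"]),
  ("customs_valuation", ["customs_release", "personal_import"]),
  ("declarants_procedure", ["declarants"]),
  ("drawback", ["conditional_exemption"]),
  ("eur1", ["rules_of_origin"]),
  ("export_control", ["ministry_defense"]),
  ("export_control_dual_use", ["export_control"]),
  ("export_declaration", ["customs_export"]),
  ("export_procedure", ["free_export"]),
  ("free_import_appendix_1", ["ministry_economy"]),
  ("free_import_appendix_12", ["ministry_defense"]),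
  ("free_import_appendix_13", ["ministry_environment"]),
  ("free_import_appendix_14", ["ministry_health"]),
  ("free_import_appendix_15", ["ministry_environment"]),
  ("free_import_appendix_17", ["ministry_agriculture"]),
  ("free_import_appendix_2", ["standards_institute"]),
  ("free_import_appendix_4", ["ministry_health"]),
  ("free_import_appendix_6", ["ministry_agriculture"]),
  ("free_import_appendix_7", ["ministry_communications"]),
  ("free_import_appendix_8", ["ministry_transport"]),
  ("free_import_appendix_9", ["ministry_defense"]),
  ("fta", ["rules_of_origin"]),
  ("international", ["fta"]),
  ("legal", ["classification_decision"]),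
  ("ministry_defense", ["export_control"]),
  ("order", ["free_import_order"]),
  ("procedure_agriculture", ["ministry_agriculture"]),
  ("procedure_communications", ["ministry_communications"]),
  ("procedure_economy", ["ministry_economy"]),
  ("procedure_health", ["ministry_health"]),
  ("procedure_transport", ["ministry_transport"]),
  ("regulation", ["free_import_order"]),
  ("rules_of_origin", ["fta"]),
  ("source_israeli", ["tariff", "free_import_order", "free_export"]),
  ("tariff", ["classification"]),
  ("temporary_export", ["ata_carnet"]),
  ("temporary_import", ["ata_carnet"])]

-- B: current = set(current_tags); one comprehension over _RELATED_BY.items() keeping each tag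
-- not in current that has a source in current (ported as filter-then-map over the items list)
def suggest_related_tags_alt (current_tags : List String) : List String :=
  let current : PySem.Set String := PySem.Set.ofList current_tags
  (pvRelatedBy.items.filter (fun p =>
    !(PySem.Set.contains current p.1) && p.2.any (fun src => PySem.Set.contains current src))).map (fun p => p.1)

-- ===== PRECONDITION & SPEC =====
def Spec_suggest_related_tags (current_tags : List String) (out : List String) : Prop := out = suggest_related_tags_alt current_tags
instance (current_tags : List String) (out : List String) : Decidable (Spec_suggest_related_tags current_tags out) := by unfold Spec_suggest_related_tags; infer_instance

-- ===== CLAIM (what is proved, stated in full; the proofs are below) =====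
def Claim_equal_suggest_related_tags : Prop := ∀ (current_tags : List String), Dom_suggest_related_tags current_tags → Spec_suggest_related_tags current_tags (suggest_related_tags current_tags)

-- ===== LEMMAS AND PROOFS =====

-- the (key, suggestion) edge sets of the two literal tables, as flat lists
def pvEdgesA : List (String × String) := pvTagAssoc.items.flatMap (fun p => p.2.map (fun s => (p.1, s)))
def pvEdgesB : List (String × String) := pvRelatedBy.items.flatMap (fun p => p.2.map (fun k => (k, p.1)))

-- the two tables carry the same edges (checked by computation on the literals)
set_option maxRecDepth 100000 in
lemma edgesA_sub : pvEdgesA.all (fun e => pvEdgesB.contains e) = true := by decide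
set_option maxRecDepth 100000 in
lemma edgesB_sub : pvEdgesB.all (fun e => pvEdgesA.contains e) = true := by decide

set_option maxRecDepth 100000 in
lemma keysA_nodup : pvTagAssoc.keys.Nodup := by decide
set_option maxRecDepth 100000 in
lemma keysB_sorted : (pvRelatedBy.items.map (fun p => p.1)).Pairwise (fun a b => a.toList < b.toList) := by decide

-- the keys of the inverted table are strictly increasing as Strings
lemma keysB_sorted' : (pvRelatedBy.items.map (fun p => p.1)).Pairwise (fun a b => a < b) :=
  keysB_sorted.imp (fun h => String.lt_iff_toList_lt.mpr h)

-- generic: membership in getD of a list-valued dict with distinct keys, via the items list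
lemma mem_getD_iff {κ α : Type} [BEq κ] [LawfulBEq κ] (d : PySem.Dict κ (List α))
    (hnd : d.keys.Nodup) (k : κ) (y : α) :
    y ∈ d.getD k [] ↔ ∃ v, (k, v) ∈ d.items ∧ y ∈ v := by
  constructor
  · intro hy
    cases h : d.get? k with
    | none =>
      rw [PySem.Dict.getD, h, Option.getD_none] at hy
      cases hy
    | some v =>
      refine ⟨v, (PySem.Dict.get?_eq_some_iff_mem_items d k v hnd).mp h, ?_⟩
      rwa [PySem.Dict.getD, h, Option.getD_some] at hy
  · rintro ⟨v, hv, hy⟩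
    rwa [PySem.Dict.getD_of_mem_items d hv hnd []]

-- edge characterisations
lemma mem_edgesA_iff (t y : String) :
    (t, y) ∈ pvEdgesA ↔ y ∈ pvTagAssoc.getD t [] := by
  rw [mem_getD_iff _ keysA_nodup]
  simp only [pvEdgesA, List.mem_flatMap, List.mem_map, Prod.mk.injEq]
  constructor
  · rintro ⟨⟨k, v⟩, hp, s, hs, h1, h2⟩
    subst h1; subst h2; exact ⟨v, hp, hs⟩
  · rintro ⟨v, hv, hy⟩
    exact ⟨(t, v), hv, y, hy, rfl, rfl⟩

lemma mem_edgesB_iff (t y : String) :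
    (t, y) ∈ pvEdgesB ↔ ∃ v, (y, v) ∈ pvRelatedBy.items ∧ t ∈ v := by
  simp only [pvEdgesB, List.mem_flatMap, List.mem_map, Prod.mk.injEq]
  constructor
  · rintro ⟨⟨k, v⟩, hp, s, hs, h1, h2⟩
    subst h1; subst h2; exact ⟨v, hp, hs⟩
  · rintro ⟨v, hv, ht⟩
    exact ⟨(y, v), hv, t, ht, rfl, rfl⟩

lemma edges_iff (t y : String) : (t, y) ∈ pvEdgesA ↔ (t, y) ∈ pvEdgesB := by
  constructor
  · intro h
    exact List.contains_iff_mem.mp (List.all_eq_true.mp edgesA_sub _ h)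
  · intro h
    exact List.contains_iff_mem.mp (List.all_eq_true.mp edgesB_sub _ h)

-- membership in A's inner loop (over one association list)
lemma memA_inner (ct : List String) (lst : List String) (sg : PySem.Set String) (y : String) :
    y ∈ lst.foldl (fun sg s => if ct.contains s then sg else PySem.Set.add sg s) sg ↔
      y ∈ sg ∨ (y ∈ lst ∧ ¬ y ∈ ct) := by
  induction lst generalizing sg with
  | nil => simp
  | cons h t ih =>
    by_cases hm : h ∈ ct
    · rw [List.foldl_cons, if_pos (by simpa using hm), ih]
      simp only [List.mem_cons]
      constructor
      · rintro (hy | ⟨hy, hn⟩)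
        exacts [Or.inl hy, Or.inr ⟨Or.inr hy, hn⟩]
      · rintro (hy | ⟨(rfl | hy), hn⟩)
        exacts [Or.inl hy, absurd hm hn, Or.inr ⟨hy, hn⟩]
    · rw [List.foldl_cons, if_neg (by simpa using hm), ih, PySem.Set.mem_add]
      simp only [List.mem_cons]
      constructor
      · rintro ((hy | rfl) | ⟨hy, hn⟩)
        exacts [Or.inl hy, Or.inr ⟨Or.inl rfl, hm⟩, Or.inr ⟨Or.inr hy, hn⟩]
      · rintro (hy | ⟨(rfl | hy), hn⟩)
        exacts [Or.inl (Or.inl hy), Or.inl (Or.inr rfl), Or.inr ⟨hy, hn⟩]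

-- A's inner loop keeps the set duplicate-free
lemma nodupA_inner (ct : List String) (lst : List String) (sg : PySem.Set String)
    (h : sg.Nodup) :
    (lst.foldl (fun sg s => if ct.contains s then sg else PySem.Set.add sg s) sg).Nodup := by
  induction lst generalizing sg with
  | nil => exact h
  | cons x t ih =>
    rw [List.foldl_cons]
    split_ifs with hc
    · exact ih sg h
    · exact ih _ (PySem.Set.nodup_add _ _ h)

-- membership in A's suggestions set
lemma memA (ct : List String) (l : List String) (init : PySem.Set String) (y : String) :
    y ∈ l.foldl (fun sugg tag =>
      if pvTagAssoc.contains tag then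
        (pvTagAssoc.getD tag []).foldl (fun sg s =>
          if ct.contains s then sg else PySem.Set.add sg s) sugg
      else sugg) init ↔
      y ∈ init ∨ (∃ tag ∈ l, y ∈ pvTagAssoc.getD tag []) ∧ ¬ y ∈ ct := by
  induction l generalizing init with
  | nil => simp
  | cons h t ih =>
    rw [List.foldl_cons]
    by_cases hc : pvTagAssoc.contains h = true
    · rw [if_pos hc, ih, memA_inner]
      simp only [List.mem_cons]
      constructor
      · rintro ((hy | ⟨hy, hn⟩) | ⟨⟨tag, ht, hy⟩, hn⟩)
        exacts [Or.inl hy, Or.inr ⟨⟨h, Or.inl rfl, hy⟩, hn⟩, Or.inr ⟨⟨tag, Or.inr ht, hy⟩, hn⟩]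
      · rintro (hy | ⟨⟨tag, (rfl | ht), hy⟩, hn⟩)
        exacts [Or.inl (Or.inl hy), Or.inl (Or.inr ⟨hy, hn⟩), Or.inr ⟨⟨tag, ht, hy⟩, hn⟩]
    · rw [if_neg hc, ih]
      have hz : pvTagAssoc.getD h [] = [] :=
        pvTagAssoc.getD_of_not_contains [] (by simpa using hc)
      simp only [List.mem_cons]
      constructor
      · rintro (hy | ⟨⟨tag, ht, hy⟩, hn⟩)
        exacts [Or.inl hy, Or.inr ⟨⟨tag, Or.inr ht, hy⟩, hn⟩]
      · rintro (hy | ⟨⟨tag, (rfl | ht), hy⟩, hn⟩)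
        · exact Or.inl hy
        · rw [hz] at hy; cases hy
        · exact Or.inr ⟨⟨tag, ht, hy⟩, hn⟩

-- A's suggestions set has no duplicates
lemma nodupA (ct : List String) (l : List String) (init : PySem.Set String) (h : init.Nodup) :
    (l.foldl (fun sugg tag =>
      if pvTagAssoc.contains tag then
        (pvTagAssoc.getD tag []).foldl (fun sg s =>
          if ct.contains s then sg else PySem.Set.add sg s) sugg
      else sugg) init).Nodup := by
  induction l generalizing init with
  | nil => exact h
  | cons x t ih =>
    rw [List.foldl_cons]
    split_ifs with hc
    · exact ih _ (nodupA_inner ct _ _ h)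
    · exact ih _ h

-- ===== VERDICT (by name: the statement is the Claim_ definition above) =====
theorem suggest_related_tags_spec : Claim_equal_suggest_related_tags := by
  intro ct _
  unfold Spec_suggest_related_tags suggest_related_tags suggest_related_tags_alt
  apply PySem.List.sorted_eq_of_perm_of_pairwise_lt
  · -- B's output is a permutation of A's suggestion set
    have hsubl : ((pvRelatedBy.items.filter (fun p =>
        !(PySem.Set.contains (PySem.Set.ofList ct) p.1) &&
          p.2.any (fun src => PySem.Set.contains (PySem.Set.ofList ct) src))).map
        (fun p => p.1)).Sublist (pvRelatedBy.items.map (fun p => p.1)) :=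
      List.filter_sublist.map _
    have hnodupB := (keysB_sorted'.sublist hsubl).imp (fun h => ne_of_lt h)
    refine (List.perm_ext_iff_of_nodup hnodupB (nodupA ct ct _ List.nodup_nil)).mpr ?_
    intro y
    have hcur : ∀ x : String, PySem.Set.contains (PySem.Set.ofList ct) x = true ↔ x ∈ ct := by
      intro x
      rw [PySem.Set.contains, List.contains_iff_mem, PySem.Set.mem_ofList]
    rw [memA ct ct _ y]
    simp only [List.not_mem_nil, false_or, List.mem_map, List.mem_filter, Bool.and_eq_true,
      Bool.not_eq_eq_eq_not, Bool.not_true, List.any_eq_true]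
    constructor
    · rintro ⟨⟨ky, srcs⟩, ⟨hmem, hnot, src, hsrc, hin⟩, rfl⟩
      have hy : (src, ky) ∈ pvEdgesB := (mem_edgesB_iff src ky).mpr ⟨srcs, hmem, hsrc⟩
      refine ⟨⟨src, (hcur src).mp hin, (mem_edgesA_iff src ky).mp ((edges_iff src ky).mpr hy)⟩, ?_⟩
      intro hky
      simp only [PySem.Set.contains, List.contains_eq_mem, decide_eq_false_iff_not] at hnot
      simp [PySem.Set.mem_ofList, hky] at hnot
    · rintro ⟨⟨t, ht, hy⟩, hynot⟩
      obtain ⟨srcs, hmem, hts⟩ := (mem_edgesB_iff t y).mp ((edges_iff t y).mp ((mem_edgesA_iff t y).mpr hy))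
      refine ⟨(y, srcs), ⟨hmem, ?_, t, hts, (hcur t).mpr ht⟩, rfl⟩
      rw [Bool.eq_false_iff]
      intro hcon
      exact hynot ((hcur y).mp hcon)
  · -- B's output is strictly increasing
    exact keysB_sorted'.sublist (List.filter_sublist.map _)
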